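-- pv_equiv track=rewrite | github.com/dhfromkorea/nfsp-poker | Programs/game/game_utils.py | get_max_bet_bucket
-- ===== SOURCE A (Python) =====
-- class Action:
--     """The possible types of actions"""
--
--     BET_BUCKETS = {
--         -1: (None, None),  # this is fold
--         0: (0, 0),  # this is check
--         1: (1, 1),
--         2: (2, 2),
--         3: (3, 4),
--         4: (5, 6),
--         5: (7, 10),
--         6: (11, 14),
--         7: (15, 19),
--         8: (20, 25),
--         9: (26, 30),
--         10: (31, 40),
--         11: (41, 60),
--         12: (61, 80),
--         13: (81, 100),
--         # 14: (101, 200)  # useless ?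
--     }
--
--     def __init__(self, type, value=0, min_raise=None, total=None):
--         assert type in {'call', 'check', 'all in', 'fold', 'raise', 'bet', 'null'}
--         self.type = type
--         self.value = value
--         self.min_raise = min_raise
--         self.total = value if total is None else total
--
--     def __repr__(self):
--         return self.type + ' ' + str(self.value)
--
--     def __eq__(self, other):
--         return (self.type == other.type) and (self.value == other.value) and (self.min_raise == other.min_raise)
--
-- def get_max_bet_bucket(stack):
--     """Returns the biggest bucket you can use to make a bet. Note that it is below the one that leads you to all-in"""
--     assert 0 < stack <= 200, stack
--     if stack == 1:  # you can just go all-in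
--         return 1
--     for bucket, range in Action.BET_BUCKETS.items():
--         if bucket == -1:
--             continue
--         if range[0] <= stack <= range[1]:
--             return bucket
--     return 13
-- ===== SOURCE B (Python) =====
-- # B: precomputed stack -> bucket lookup table instead of scanning ranges per call.
-- BUCKET_RANGES = [
--     (0, 0, 0), (1, 1, 1), (2, 2, 2), (3, 3, 4), (4, 5, 6), (5, 7, 10),
--     (6, 11, 14), (7, 15, 19), (8, 20, 25), (9, 26, 30), (10, 31, 40),
--     (11, 41, 60), (12, 61, 80), (13, 81, 100),
-- ]
--
-- STACK_TO_BUCKET = {s: b for (b, lo, hi) in BUCKET_RANGES for s in range(lo, hi + 1)}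
--
-- def get_max_bet_bucket(stack):
--     assert 0 < stack <= 200, stack
--     return STACK_TO_BUCKET.get(stack, 13)
-- ===== Notes on version B (the rewrite author's own statement) =====
-- stated objective: simpler
-- what changed: Replaces the per-call scan over bucket ranges (plus the stack==1 special case) with a one-time precomputed dict mapping every in-range stack to its bucket, so each call is a single lookup with default 13.
import Mathlib
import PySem

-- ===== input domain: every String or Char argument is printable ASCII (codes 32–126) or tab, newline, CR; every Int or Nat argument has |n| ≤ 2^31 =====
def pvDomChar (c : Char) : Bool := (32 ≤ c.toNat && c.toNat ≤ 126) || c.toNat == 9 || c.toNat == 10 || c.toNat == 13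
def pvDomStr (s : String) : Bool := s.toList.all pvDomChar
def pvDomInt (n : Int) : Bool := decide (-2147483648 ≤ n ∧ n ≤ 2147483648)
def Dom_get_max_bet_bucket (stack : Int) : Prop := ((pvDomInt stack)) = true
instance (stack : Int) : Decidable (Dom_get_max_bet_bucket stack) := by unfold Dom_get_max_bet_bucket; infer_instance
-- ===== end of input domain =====

-- B replaces A's per-call scan over bucket ranges with a precomputed stack→bucket table; simpler per-call logic, same values.

-- ===== PORT A =====
-- Action.BET_BUCKETS as an ordered association list; (None, None) for fold = (none, none).
def betBuckets : List (Int × Option Int × Option Int) :=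
  [(-1, none, none), (0, some 0, some 0), (1, some 1, some 1), (2, some 2, some 2),
   (3, some 3, some 4), (4, some 5, some 6), (5, some 7, some 10), (6, some 11, some 14),
   (7, some 15, some 19), (8, some 20, some 25), (9, some 26, some 30), (10, some 31, some 40),
   (11, some 41, some 60), (12, some 61, some 80), (13, some 81, some 100)]

-- the for-loop over BET_BUCKETS.items() with its early return; the -1 entry is skipped
-- before its (none, none) range is ever read, so the range comparison only sees `some`s.
def loopA (stack : Int) : List (Int × Option Int × Option Int) → Int
  | [] => 13
  | (bucket, lo, hi) :: rest =>
    if bucket = -1 then loopA stack rest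
    else if lo.getD 0 ≤ stack ∧ stack ≤ hi.getD 0 then bucket
    else loopA stack rest

def get_max_bet_bucket (stack : Int) : Int :=
  if stack = 1 then 1 else loopA stack betBuckets

-- ===== PORT B =====
def bucketRanges : List (Int × Int × Int) :=
  [(0, 0, 0), (1, 1, 1), (2, 2, 2), (3, 3, 4), (4, 5, 6), (5, 7, 10),
   (6, 11, 14), (7, 15, 19), (8, 20, 25), (9, 26, 30), (10, 31, 40),
   (11, 41, 60), (12, 61, 80), (13, 81, 100)]

-- STACK_TO_BUCKET = {s: b for (b, lo, hi) in BUCKET_RANGES for s in range(lo, hi + 1)}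
def stackToBucket : PySem.Dict Int Int :=
  bucketRanges.foldl
    (fun d t => (PySem.List.pyRange t.2.1 (t.2.2 + 1) 1).foldl (fun d s => d.insert s t.1) d)
    PySem.Dict.empty

def get_max_bet_bucket_alt (stack : Int) : Int :=
  PySem.Dict.getD stackToBucket stack 13

-- ===== PRECONDITION & SPEC =====
-- the assert raises AssertionError unless 0 < stack <= 200
def Pre_get_max_bet_bucket (stack : Int) : Prop := 0 < stack ∧ stack ≤ 200
instance (stack : Int) : Decidable (Pre_get_max_bet_bucket stack) := by
  unfold Pre_get_max_bet_bucket; infer_instance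
def pvWitness_get_max_bet_bucket : Int := 5

def Spec_get_max_bet_bucket (stack : Int) (out : Int) : Prop := out = get_max_bet_bucket_alt stack
instance (stack : Int) (out : Int) : Decidable (Spec_get_max_bet_bucket stack out) := by unfold Spec_get_max_bet_bucket; infer_instance

-- ===== CLAIM (what is proved, stated in full; the proofs are below) =====
def Claim_equal_get_max_bet_bucket : Prop := ∀ (stack : Int), Dom_get_max_bet_bucket stack → Pre_get_max_bet_bucket stack → Spec_get_max_bet_bucket stack (get_max_bet_bucket stack)

-- ===== LEMMAS AND PROOFS =====

-- ===== VERDICT (by name: the statement is the Claim_ definition above) =====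
set_option maxRecDepth 4000 in
theorem get_max_bet_bucket_spec : Claim_equal_get_max_bet_bucket := by
  intro stack _ hpre
  obtain ⟨h1, h2⟩ := hpre
  unfold Spec_get_max_bet_bucket
  interval_cases stack <;> decide
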